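-- pv_equiv track=rewrite | github.com/Kai-Meiklejohn/neetcode-submissions | Data Structures & Algorithms/maximum-score-after-splitting-a-string/submission-1.py | maxScore
-- ===== SOURCE A (Python) =====
-- def maxScore(s: str) -> int:
--
--     res = 0
--     length = len(s)
--
--     for i in range(1, length):
--         tmp = 0
--         left = s[:i]
--         right = s[i:]
--         tmp += left.count('0')
--         tmp += right.count('1')
--         res = max(tmp, res)
--
--     return res
-- ===== SOURCE B (Python) =====
-- def maxScore(s: str) -> int:
--     # Single pass: precompute total ones; maintain running zero count on the left
--     # and remaining ones on the right while sweeping the split point.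
--     ones = s.count('1')
--     zeros = 0
--     best = 0
--     for c in s[:-1]:
--         if c == '0':
--             zeros += 1
--         elif c == '1':
--             ones -= 1
--         cur = zeros + ones
--         if cur > best:
--             best = cur
--     return best
-- ===== Notes on version B (the rewrite author's own statement) =====
-- stated objective: faster
-- what changed: Replaced the per-split slice-and-count (rescanning the whole string for every split point) by a single left-to-right sweep with the total number of ones precomputed and running zero/one counters.
import Mathlib
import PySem

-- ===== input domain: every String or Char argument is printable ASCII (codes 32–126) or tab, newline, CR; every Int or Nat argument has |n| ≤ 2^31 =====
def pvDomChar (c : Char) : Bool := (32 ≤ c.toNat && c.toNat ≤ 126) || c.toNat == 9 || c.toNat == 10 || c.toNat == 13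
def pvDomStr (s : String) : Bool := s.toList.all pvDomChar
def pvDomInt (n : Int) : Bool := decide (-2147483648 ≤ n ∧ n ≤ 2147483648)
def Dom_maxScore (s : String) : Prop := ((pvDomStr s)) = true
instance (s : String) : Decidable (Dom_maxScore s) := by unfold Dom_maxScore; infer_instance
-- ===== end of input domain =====

-- B replaces A's per-split slice-and-count with one left-to-right pass (total ones
-- precomputed, running zero/one counters); return values are proved equal (objective: faster).

-- ===== PORT A =====
-- for i in range(1, len(s)): tmp = s[:i].count('0') + s[i:].count('1'); res = max(tmp, res)
def maxScore (s : String) : Int :=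
  (PySem.List.pyRange 1 (s.toList.length : Int) 1).foldl
    (fun res i =>
      let left := PySem.List.slice s.toList none (some i)
      let right := PySem.List.slice s.toList (some i) none
      let tmp : Int := (left.count '0' : Int) + (right.count '1' : Int)
      max tmp res) 0

-- ===== PORT B =====
-- body of B's loop: state (ones, zeros, best); if/elif update, then best update
def maxScoreAltStep (st : Int × Int × Int) (c : Char) : Int × Int × Int :=
  let ones := st.1
  let zeros := st.2.1
  let best := st.2.2
  let p := if c = '0' then (ones, zeros + 1)
           else if c = '1' then (ones - 1, zeros)
           else (ones, zeros)
  let cur := p.2 + p.1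
  (p.1, p.2, if cur > best then cur else best)

def maxScore_alt (s : String) : Int :=
  (s.toList.dropLast.foldl maxScoreAltStep ((s.toList.count '1' : Int), 0, 0)).2.2

-- ===== PRECONDITION & SPEC =====
def Spec_maxScore (s : String) (out : Int) : Prop := out = maxScore_alt s
instance (s : String) (out : Int) : Decidable (Spec_maxScore s out) := by unfold Spec_maxScore; infer_instance

-- ===== CLAIM (what is proved, stated in full; the proofs are below) =====
def Claim_equal_maxScore : Prop := ∀ (s : String), Dom_maxScore s → Spec_maxScore s (maxScore s)

-- ===== LEMMAS AND PROOFS =====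

-- (if x > b then x else b) is max
theorem pvIteGtMax (x b : Int) : (if x > b then x else b) = max x b := by
  split_ifs with h <;> omega

-- one step of B's loop, in closed form
theorem pvStepEq (o z b : Int) (c : Char) :
    maxScoreAltStep (o, z, b) c =
      (o - (if c = '1' then 1 else 0), z + (if c = '0' then 1 else 0),
        max (z + (if c = '0' then 1 else 0) + (o - (if c = '1' then 1 else 0))) b) := by
  have hne : ('0' : Char) ≠ '1' := by decide
  by_cases h0 : c = '0'
  · subst h0; simp [maxScoreAltStep, hne, pvIteGtMax]
  · by_cases h1 : c = '1'
    · subst h1; simp [maxScoreAltStep, h0, pvIteGtMax]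
    · simp [maxScoreAltStep, h0, h1, pvIteGtMax]

-- B's fold, started at (o, z, b), computes the running max over the prefixes of m.
theorem maxScoreAlt_fold (m : List Char) (o z b : Int) :
    (m.foldl maxScoreAltStep (o, z, b)).2.2 =
    (List.range m.length).foldl
      (fun res k =>
        max (z + ((m.take (k+1)).count '0' : Int)
             + (o - ((m.take (k+1)).count '1' : Int))) res) b := by
  induction m generalizing o z b with
  | nil => simp
  | cons c t ih =>
    rw [List.foldl_cons, pvStepEq, ih, List.length_cons, List.range_succ_eq_map,
      List.foldl_cons, List.foldl_map]
    have hinit :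
        max (z + (((c :: t).take (0+1)).count '0' : Int)
             + (o - (((c :: t).take (0+1)).count '1' : Int))) b
        = max (z + (if c = '0' then 1 else 0) + (o - (if c = '1' then 1 else 0))) b := by
      simp [List.count_cons]
    rw [hinit]
    apply PySem.List.foldl_congr_mem
    intro acc k _
    have htake : (c :: t).take (k.succ + 1) = c :: t.take (k + 1) := rfl
    rw [htake]
    simp only [List.count_cons]
    by_cases h0 : c = '0' <;> by_cases h1 : c = '1' <;>
      simp [h0, h1] <;> ring_nf

-- the per-split score, as A computes it
theorem split_score (l : List Char) (k : Nat) (hk : k < l.length - 1) :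
    ((l.dropLast.take (k+1)).count '0' : Int)
      + ((l.count '1' : Int) - ((l.dropLast.take (k+1)).count '1' : Int)) =
    ((l.take (k+1)).count '0' : Int) + ((l.drop (k+1)).count '1' : Int) := by
  have htake : l.dropLast.take (k+1) = l.take (k+1) := by
    rw [List.dropLast_eq_take, List.take_take]
    congr 1
    omega
  rw [htake]
  have hsplit : l.count '1' = (l.take (k+1)).count '1' + (l.drop (k+1)).count '1' := by
    conv_lhs => rw [← List.take_append_drop (k+1) l]
    rw [List.count_append]
  rw [hsplit]
  push_cast
  ring

theorem maxScore_eq (s : String) : maxScore s = maxScore_alt s := by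
  unfold maxScore maxScore_alt
  generalize s.toList = l
  rw [maxScoreAlt_fold, PySem.List.pyRange_one, List.foldl_map, List.length_dropLast]
  have hlen : ((l.length : Int) - 1).toNat = l.length - 1 := by omega
  rw [hlen]
  apply PySem.List.foldl_congr_mem
  intro res k hk
  have hk' : k < l.length - 1 := by
    have := List.mem_range.mp hk
    omega
  show max ((PySem.List.slice l none (some (1 + (k:Int)))).count '0'
        + ((PySem.List.slice l (some (1 + (k:Int))) none).count '1' : Int)) res = _
  have h1k : (1 : Int) + (k : Int) = ((k + 1 : Nat) : Int) := by push_cast; ring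
  rw [h1k, PySem.List.slice_to_natCast, PySem.List.slice_from_natCast,
    ← split_score l k hk']
  ring_nf

-- ===== VERDICT (by name: the statement is the Claim_ definition above) =====
theorem maxScore_spec : Claim_equal_maxScore := by
  intro s _
  unfold Spec_maxScore
  exact maxScore_eq s
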